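-- pv_equiv track=rewrite | github.com/vinchinzu/euler | python/211.py | sum_divisor_powers
-- ===== SOURCE A (Python) =====
-- from math import isqrt
-- from typing import List
--
-- def build_spf(limit: int) -> List[int]:
--     """Build smallest prime factor array up to limit."""
--     spf = list(range(limit + 1))
--     for i in range(2, isqrt(limit) + 1):
--         if spf[i] == i:
--             for j in range(i * i, limit + 1, i):
--                 if spf[j] == j:
--                     spf[j] = i
--     return spf
--
-- def sum_divisor_powers(limit: int, exp: int) -> List[int]:
--     """Compute sum of divisor powers for each number up to limit."""
--     spf = build_spf(limit)
--     result = [0] * (limit + 1)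
--     result[1] = 1
--
--     for i in range(2, limit + 1):
--         n = i
--         mult = 1
--         while n % spf[i] == 0:
--             n //= spf[i]
--             mult = mult * (spf[i] ** exp) + 1
--         result[i] = result[n] * mult
--
--     return result
-- ===== SOURCE B (Python) =====
-- def sum_divisor_powers(limit: int, exp: int) -> list:
--     """Compute sum of divisor powers for each number up to limit.
--
--     Divisor-accumulation sieve: each d >= 1 adds d**exp directly to all of
--     its multiples; no smallest-prime-factor array, no per-number factorization.
--     """
--     result = [0] * (limit + 1)
--     result[1] = 1
--     for i in range(2, limit + 1):
--         result[i] = 1  # contribution of divisor 1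
--     for d in range(2, limit + 1):
--         de = d ** exp
--         for m in range(d, limit + 1, d):
--             result[m] += de
--     return result
-- ===== Notes on version B (the rewrite author's own statement) =====
-- stated objective: simpler
-- what changed: Replaced the smallest-prime-factor sieve plus per-number factorization DP by a direct divisor-accumulation sieve: each d adds d**exp to all of its multiples, so no SPF array and no while-loop factorization exist in B.
import Mathlib
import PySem

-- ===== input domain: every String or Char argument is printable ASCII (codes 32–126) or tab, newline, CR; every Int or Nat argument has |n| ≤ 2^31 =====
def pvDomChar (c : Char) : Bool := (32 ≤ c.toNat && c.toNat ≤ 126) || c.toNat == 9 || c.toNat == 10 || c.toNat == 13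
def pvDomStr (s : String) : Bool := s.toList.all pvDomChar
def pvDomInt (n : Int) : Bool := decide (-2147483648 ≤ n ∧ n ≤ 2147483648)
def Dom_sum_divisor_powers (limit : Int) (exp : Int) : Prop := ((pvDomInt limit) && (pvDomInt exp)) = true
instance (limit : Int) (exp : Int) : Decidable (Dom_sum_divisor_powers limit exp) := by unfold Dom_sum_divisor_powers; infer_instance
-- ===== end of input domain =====

-- B replaces A's smallest-prime-factor sieve + per-number factorization DP by a direct
-- divisor-accumulation sieve (each d adds d**exp to all of its multiples): simpler, no SPF array.

-- ===== PORT A =====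
-- math.isqrt(n): exact for n ≥ 0 (Pre_ gives limit ≥ 1; Python raises ValueError for n < 0)
def pyIsqrt (n : Int) : Int := (Nat.sqrt n.toNat : Int)

def build_spf (limit : Int) : List Int :=
  let spf := PySem.List.pyRange 0 (limit + 1) 1
  (PySem.List.pyRange 2 (pyIsqrt limit + 1) 1).foldl (fun spf i =>
    if PySem.List.pyGetD spf i 0 = i then
      (PySem.List.pyRange (i * i) (limit + 1) i).foldl (fun spf j =>
        if PySem.List.pyGetD spf j 0 = j then PySem.List.pySetD spf j i else spf) spf
    else spf) spf

-- the 'while n % spf[i] == 0:' loop; the fuel argument only makes it total (the caller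
-- supplies enough fuel: the loop runs at most log₂ i times). spf[i]**exp is p ^ exp.toNat
-- (exp ≥ 0 under Pre_; a negative exp yields floats in Python and is outside Pre_).
def spfWhile (p : Int) (exp : Int) : Nat → Int → Int → Int × Int
  | 0, n, mult => (n, mult)
  | fuel+1, n, mult =>
    if PySem.Int.mod n p = 0 then
      spfWhile p exp fuel (PySem.Int.floordiv n p) (mult * p ^ exp.toNat + 1)
    else (n, mult)

def sum_divisor_powers (limit : Int) (exp : Int) : List Int :=
  let spf := build_spf limit
  let result := List.replicate (limit + 1).toNat (0 : Int)   -- [0] * (limit + 1)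
  let result := PySem.List.pySetD result 1 1                 -- result[1] = 1 (in range: limit ≥ 1)
  (PySem.List.pyRange 2 (limit + 1) 1).foldl (fun result i =>
    let p := PySem.List.pyGetD spf i 0
    let nm := spfWhile p exp i.toNat i 1
    PySem.List.pySetD result i (PySem.List.pyGetD result nm.1 0 * nm.2)) result

-- ===== PORT B =====
def sum_divisor_powers_alt (limit : Int) (exp : Int) : List Int :=
  let result := List.replicate (limit + 1).toNat (0 : Int)
  let result := PySem.List.pySetD result 1 1
  let result := (PySem.List.pyRange 2 (limit + 1) 1).foldl
    (fun r i => PySem.List.pySetD r i 1) result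
  (PySem.List.pyRange 2 (limit + 1) 1).foldl (fun r d =>
    let de := d ^ exp.toNat
    (PySem.List.pyRange d (limit + 1) d).foldl
      (fun r m => PySem.List.pySetD r m (PySem.List.pyGetD r m 0 + de)) r) result

-- ===== PRECONDITION & SPEC =====
-- Pre_ excludes limit < 1, on which A raises (IndexError at result[1]=1, or ValueError from
-- isqrt for negative limit), and exp < 0, on which A returns a list of FLOATS (spf[i]**exp
-- is a float), not a value of the declared List[int] type.
def Pre_sum_divisor_powers (limit : Int) (exp : Int) : Prop := 1 ≤ limit ∧ 0 ≤ exp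
instance (limit : Int) (exp : Int) : Decidable (Pre_sum_divisor_powers limit exp) := by
  unfold Pre_sum_divisor_powers; infer_instance

def pvWitness_sum_divisor_powers : Int × Int := (12, 2)

def Spec_sum_divisor_powers (limit : Int) (exp : Int) (out : List Int) : Prop :=
  out = sum_divisor_powers_alt limit exp
instance (limit : Int) (exp : Int) (out : List Int) : Decidable (Spec_sum_divisor_powers limit exp out) := by
  unfold Spec_sum_divisor_powers; infer_instance

-- ===== CLAIM (what is proved, stated in full; the proofs are below) =====
def Claim_equal_sum_divisor_powers : Prop := ∀ (limit : Int) (exp : Int),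
  Dom_sum_divisor_powers limit exp → Pre_sum_divisor_powers limit exp →
  Spec_sum_divisor_powers limit exp (sum_divisor_powers limit exp)

-- ===== LEMMAS AND PROOFS =====

-- σ_e(k) over ℕ and its ℤ cast; σ_e(0) = 0, σ_e(1) = 1.
def sigN (e k : ℕ) : ℕ := ∑ d ∈ k.divisors, d ^ e
def sigI (e k : ℕ) : ℤ := (sigN e k : ℤ)

-- the common normal form both ports are proved equal to
def specList (limit : Int) (exp : Int) : List Int :=
  (List.range (limit + 1).toNat).map (fun k => sigI exp.toNat k)

lemma sigI_one (e : ℕ) : sigI e 1 = 1 := by simp [sigI, sigN]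
lemma sigI_zero (e : ℕ) : sigI e 0 = 0 := by simp [sigI, sigN]

lemma sigN_eq_sigma (e k : ℕ) : sigN e k = ArithmeticFunction.sigma e k := by
  simp [sigN, ArithmeticFunction.sigma_apply]

lemma sigN_mul_coprime (e : ℕ) {a b : ℕ} (h : Nat.Coprime a b) :
    sigN e (a * b) = sigN e a * sigN e b := by
  simp only [sigN_eq_sigma]
  exact (ArithmeticFunction.isMultiplicative_sigma).map_mul_of_coprime h

lemma sigN_prime_pow (e : ℕ) {p : ℕ} (hp : p.Prime) (v : ℕ) :
    sigN e (p ^ v) = ∑ j ∈ Finset.range (v + 1), (p ^ e) ^ j := by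
  unfold sigN
  rw [Nat.divisors_prime_pow hp, Finset.sum_map]
  simp [pow_right_comm]

lemma sigI_split (e : ℕ) {k M : ℕ} (h1 : 1 ≤ k) (hM : k < M) :
    sigI e k = 1 + ∑ d ∈ Finset.Ico 2 M, (if d ∣ k then ((d : ℤ)) ^ e else 0) := by
  have hdiv : k.divisors = (Finset.Ico 1 (k+1)).filter (· ∣ k) := rfl
  have hsub : (Finset.Ico 1 (k+1)).filter (· ∣ k) = (Finset.Ico 1 M).filter (· ∣ k) := by
    apply Finset.ext
    intro d
    simp only [Finset.mem_filter, Finset.mem_Ico]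
    constructor
    · rintro ⟨⟨h1d, h2d⟩, h3d⟩; exact ⟨⟨h1d, by omega⟩, h3d⟩
    · rintro ⟨⟨h1d, h2d⟩, h3d⟩
      exact ⟨⟨h1d, by have := Nat.le_of_dvd (by omega) h3d; omega⟩, h3d⟩
  have hIco : sigI e k = ∑ d ∈ Finset.Ico 1 M, (if d ∣ k then ((d : ℤ)) ^ e else 0) := by
    unfold sigI sigN
    rw [hdiv, hsub, Finset.sum_filter]
    push_cast
    rfl
  rw [hIco]
  rw [show Finset.Ico 1 M = insert 1 (Finset.Ico 2 M) by
    apply Finset.ext; intro d; simp [Finset.mem_Ico, Finset.mem_insert]; omega]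
  rw [Finset.sum_insert (by simp [Finset.mem_Ico])]
  simp

-- ---- pointwise update/read helpers ----

lemma getD_set_self (l : List Int) (i : ℕ) (v : Int) (h : i < l.length) :
    (l.set i v).getD i 0 = v := by
  simp [List.getD_eq_getElem?_getD, h]

lemma getD_set_ne (l : List Int) (i k : ℕ) (v : Int) (h : i ≠ k) :
    (l.set i v).getD k 0 = l.getD k 0 := by
  simp [List.getD_eq_getElem?_getD, h]

-- ---- generic fold lemmas (B's inner loop, B's init loop, A's sieve inner loop) ----

lemma foldl_add_at (de : Int) (L : List Int) :
    ∀ (r : List Int), (∀ m ∈ L, 0 ≤ m ∧ m < (r.length : Int)) →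
    (L.foldl (fun r m => PySem.List.pySetD r m (PySem.List.pyGetD r m 0 + de)) r).length = r.length ∧
    ∀ k : ℕ, (L.foldl (fun r m => PySem.List.pySetD r m (PySem.List.pyGetD r m 0 + de)) r).getD k 0
      = r.getD k 0 + de * (L.count (k : Int)) := by
  induction L with
  | nil => intro r _; simp
  | cons m L ih =>
    intro r hL
    obtain ⟨hm0, hmlt⟩ := hL m List.mem_cons_self
    have hset : PySem.List.pySetD r m (PySem.List.pyGetD r m 0 + de)
        = r.set m.toNat (r.getD m.toNat 0 + de) := by
      rw [PySem.List.pySetD_of_nonneg _ _ hm0, PySem.List.pyGetD_of_nonneg _ _ hm0]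
    have hlen1 : (r.set m.toNat (r.getD m.toNat 0 + de)).length = r.length := by simp
    obtain ⟨ihlen, ihval⟩ := ih (r.set m.toNat (r.getD m.toNat 0 + de)) (by
      intro x hx
      have := hL x (List.mem_cons_of_mem _ hx)
      rw [hlen1]; exact this)
    refine ⟨?_, ?_⟩
    · simp only [List.foldl_cons, hset]; rw [ihlen, hlen1]
    · intro k
      simp only [List.foldl_cons, hset]
      rw [ihval k]
      have hcnt : ((m :: L).count (k : Int) : Int) = (L.count (k : Int) : Int) + if (k : Int) = m then 1 else 0 := by
        by_cases h : (k : Int) = m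
        · simp [h]
        · simp [List.count_cons, h]
          omega
      rw [hcnt]
      by_cases hk : (k : Int) = m
      · have hkm : m.toNat = k := by omega
        have hklt : k < r.length := by omega
        rw [hkm, getD_set_self _ _ _ hklt]
        simp [hk]; ring
      · have hkm : m.toNat ≠ k := by omega
        rw [getD_set_ne _ _ _ _ hkm]
        simp [hk]

lemma foldl_set_one (L : List Int) :
    ∀ (r : List Int), (∀ m ∈ L, 0 ≤ m ∧ m < (r.length : Int)) →
    (L.foldl (fun r i => PySem.List.pySetD r i 1) r).length = r.length ∧
    ∀ k : ℕ, (L.foldl (fun r i => PySem.List.pySetD r i 1) r).getD k 0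
      = if (k : Int) ∈ L then 1 else r.getD k 0 := by
  induction L with
  | nil => intro r _; simp
  | cons m L ih =>
    intro r hL
    obtain ⟨hm0, hmlt⟩ := hL m List.mem_cons_self
    have hset : PySem.List.pySetD r m 1 = r.set m.toNat 1 :=
      PySem.List.pySetD_of_nonneg _ _ hm0
    have hlen1 : (r.set m.toNat 1).length = r.length := by simp
    obtain ⟨ihlen, ihval⟩ := ih (r.set m.toNat 1) (by
      intro x hx
      have := hL x (List.mem_cons_of_mem _ hx)
      rw [hlen1]; exact this)
    refine ⟨?_, ?_⟩
    · simp only [List.foldl_cons, hset]; rw [ihlen, hlen1]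
    · intro k
      simp only [List.foldl_cons, hset]
      rw [ihval k]
      by_cases hmem : (k : Int) ∈ L
      · simp [hmem, List.mem_cons]
      · by_cases hk : (k : Int) = m
        · have hkm : m.toNat = k := by omega
          have hklt : k < r.length := by omega
          rw [hkm, getD_set_self _ _ _ hklt]
          simp [List.mem_cons, hk]
        · have hkm : m.toNat ≠ k := by omega
          rw [getD_set_ne _ _ _ _ hkm]
          simp [hmem, hk, List.mem_cons]

lemma foldl_sieve_at (i : Int) (L : List Int) :
    ∀ (r : List Int), (∀ j ∈ L, i < j ∧ 0 ≤ j ∧ j < (r.length : Int)) →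
    (L.foldl (fun r j => if PySem.List.pyGetD r j 0 = j then PySem.List.pySetD r j i else r) r).length = r.length ∧
    (∀ k : ℕ, k < r.length →
      (L.foldl (fun r j => if PySem.List.pyGetD r j 0 = j then PySem.List.pySetD r j i else r) r).getD k 0 = r.getD k 0 ∨
      ((L.foldl (fun r j => if PySem.List.pyGetD r j 0 = j then PySem.List.pySetD r j i else r) r).getD k 0 = i ∧ (k : Int) ∈ L)) ∧
    (∀ k : ℕ, k < r.length → (r.getD k 0 ≠ (k : Int) ∨ (k : Int) ∈ L) →
      (L.foldl (fun r j => if PySem.List.pyGetD r j 0 = j then PySem.List.pySetD r j i else r) r).getD k 0 ≠ (k : Int)) := by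
  induction L with
  | nil => intro r _; refine ⟨rfl, fun k _ => Or.inl rfl, fun k _ h => ?_⟩
           rcases h with h | h
           · exact h
           · simp at h
  | cons j L ih =>
    intro r hL
    obtain ⟨hij, hj0, hjlt⟩ := hL j List.mem_cons_self
    set r1 := if PySem.List.pyGetD r j 0 = j then PySem.List.pySetD r j i else r with hr1
    have hget : PySem.List.pyGetD r j 0 = r.getD j.toNat 0 := PySem.List.pyGetD_of_nonneg _ _ hj0
    have hsetd : PySem.List.pySetD r j i = r.set j.toNat i := PySem.List.pySetD_of_nonneg _ _ hj0
    have hlen1 : r1.length = r.length := by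
      rw [hr1]; split <;> simp [hsetd]
    have hval1 : ∀ k : ℕ, k < r.length → r1.getD k 0 = r.getD k 0 ∨ (r1.getD k 0 = i ∧ (k : Int) = j) := by
      intro k hk
      rw [hr1]
      split
      · rw [hsetd]
        by_cases hkj : j.toNat = k
        · right
          constructor
          · rw [hkj, getD_set_self _ _ _ (by omega)]
          · omega
        · left; rw [getD_set_ne _ _ _ _ hkj]
      · left; rfl
    have hstep_neq : ∀ k : ℕ, (k : Int) = j → k < r.length → r1.getD k 0 ≠ (k : Int) := by
      intro k hkj hk
      have hkj' : j.toNat = k := by omega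
      rw [hr1]
      split
      · rw [hsetd, hkj', getD_set_self _ _ _ hk]
        omega
      · rename_i hguard
        rw [hget, hkj'] at hguard
        intro hc; exact hguard (by rw [hc, hkj])
    obtain ⟨ihlen, ihval, ihneq⟩ := ih r1 (by
      intro x hx
      have := hL x (List.mem_cons_of_mem _ hx)
      rw [hlen1]; exact this)
    refine ⟨?_, ?_, ?_⟩
    · simp only [List.foldl_cons]; rw [← hr1, ihlen, hlen1]
    · intro k hk
      simp only [List.foldl_cons]; rw [← hr1]
      rcases ihval k (by omega) with h | ⟨h, hmem⟩
      · rcases hval1 k hk with h1 | ⟨h1, hkj⟩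
        · left; rw [h, h1]
        · right; exact ⟨by rw [h, h1], by rw [hkj]; exact List.mem_cons_self⟩
      · right; exact ⟨h, List.mem_cons_of_mem _ hmem⟩
    · intro k hk hcond
      simp only [List.foldl_cons]; rw [← hr1]
      have hik_of_kj : (k : Int) = j → (i : Int) ≠ (k : Int) := by intro h; omega
      rcases hcond with hne | hmem
      · apply ihneq k (by omega)
        left
        rcases hval1 k hk with h1 | ⟨h1, hkj⟩
        · rw [h1]; exact hne
        · rw [h1]; exact fun hc => hik_of_kj hkj hc
      · rcases List.mem_cons.mp hmem with hkj | hmem'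
        · apply ihneq k (by omega)
          left
          exact hstep_neq k hkj hk
        · apply ihneq k (by omega)
          right; exact hmem'

-- ---- the sieve produces a prime factor at every index 2 ≤ k ≤ limit ----

def SpfFact (limit : Int) (s : List Int) : Prop :=
  s.length = (limit + 1).toNat ∧
  ∀ k : ℕ, 2 ≤ k → k < (limit + 1).toNat →
    ∃ p : ℕ, s.getD k 0 = (p : Int) ∧ p.Prime ∧ p ∣ k

def SInv (limit : Int) (I : Int) (s : List Int) : Prop :=
  s.length = (limit + 1).toNat ∧
  (∀ k : ℕ, k < (limit + 1).toNat →
    s.getD k 0 = (k : Int) ∨ ∃ p : ℕ, s.getD k 0 = (p : Int) ∧ p.Prime ∧ p ∣ k ∧ p < k) ∧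
  (∀ k : ℕ, k < (limit + 1).toNat → ∀ p : ℕ, p.Prime → p ∣ k → (p : Int) < I → p * p ≤ k →
    s.getD k 0 ≠ (k : Int))

lemma SInv_step {limit I : Int} {s : List Int} (hlim : 1 ≤ limit) (hI2 : 2 ≤ I) (hIlim : I ≤ limit)
    (h : SInv limit I s) :
    SInv limit (I + 1)
      (if PySem.List.pyGetD s I 0 = I then
        (PySem.List.pyRange (I * I) (limit + 1) I).foldl
          (fun spf j => if PySem.List.pyGetD spf j 0 = j then PySem.List.pySetD spf j I else spf) s
      else s) := by
  obtain ⟨hlen, ha, hb⟩ := h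
  have hL1 : ((limit + 1).toNat : Int) = limit + 1 := by omega
  have hIL : I.toNat < (limit + 1).toNat := by omega
  have hgetI : PySem.List.pyGetD s I 0 = s.getD I.toNat 0 :=
    PySem.List.pyGetD_of_nonneg _ _ (by omega)
  by_cases hg : PySem.List.pyGetD s I 0 = I
  · rw [if_pos hg]
    have hIprime : (I.toNat).Prime := by
      by_contra hnp
      have hne1 : I.toNat ≠ 1 := by omega
      have hq : (I.toNat).minFac.Prime := Nat.minFac_prime hne1
      have hqd : (I.toNat).minFac ∣ I.toNat := Nat.minFac_dvd _
      have hqne : (I.toNat).minFac ≠ I.toNat := by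
        intro hqe; exact hnp ((Nat.prime_def_minFac).mpr ⟨by omega, hqe⟩)
      have hqlt : (I.toNat).minFac < I.toNat :=
        lt_of_le_of_ne (Nat.le_of_dvd (by omega) hqd) hqne
      have hqq : (I.toNat).minFac * (I.toNat).minFac ≤ I.toNat := by
        have := Nat.minFac_sq_le_self (by omega : 0 < I.toNat) hnp
        nlinarith [this]
      have := hb I.toNat hIL (I.toNat).minFac hq hqd (by omega) hqq
      apply this
      rw [← hgetI, hg]; omega
    have hmem : ∀ x : Int, x ∈ PySem.List.pyRange (I * I) (limit + 1) I ↔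
        I * I ≤ x ∧ x < limit + 1 ∧ I ∣ x := by
      intro x
      rw [PySem.List.mem_pyRange_iff_of_pos (by omega)]
      constructor
      · rintro ⟨h1, h2, h3⟩
        refine ⟨h1, h2, ?_⟩
        have hx : x = (x - I * I) + I * I := by ring
        rw [hx]; exact dvd_add h3 (Dvd.intro I rfl)
      · rintro ⟨h1, h2, h3⟩
        exact ⟨h1, h2, dvd_sub h3 (Dvd.intro I rfl)⟩
    obtain ⟨flen, fval, fneq⟩ := foldl_sieve_at I (PySem.List.pyRange (I * I) (limit + 1) I) s (by
      intro j hj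
      rw [hmem j] at hj
      refine ⟨by nlinarith [hj.1], by nlinarith [hj.1], ?_⟩
      rw [hlen, hL1]; exact hj.2.1)
    refine ⟨by rw [flen, hlen], ?_, ?_⟩
    · intro k hk
      rcases fval k (by omega) with hun | ⟨hv, hmemk⟩
      · rw [hun]; exact ha k hk
      · right
        rw [hmem] at hmemk
        refine ⟨I.toNat, by rw [hv]; omega, hIprime, ?_, ?_⟩
        · have hIk : I ∣ (k : Int) := hmemk.2.2
          have h2 : ((I.toNat : Int)) ∣ ((k : Int)) := by
            rwa [Int.toNat_of_nonneg (by omega : (0:Int) ≤ I)]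
          exact_mod_cast h2
        · have hIltk : I < (k : Int) := by nlinarith [hmemk.1]
          omega
    · intro k hk p hp hpd hpI hpp
      by_cases hpltI : (p : Int) < I
      · exact fneq k (by omega) (Or.inl (hb k hk p hp hpd hpltI hpp))
      · have hpi : (p : Int) = I := by omega
        apply fneq k (by omega)
        right
        rw [hmem]
        refine ⟨by push_cast [← hpi]; exact_mod_cast hpp, by omega, ?_⟩
        rw [← hpi]; exact_mod_cast hpd
  · rw [if_neg hg]
    refine ⟨hlen, ha, ?_⟩
    intro k hk p hp hpd hpI hpp
    by_cases hpltI : (p : Int) < I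
    · exact hb k hk p hp hpd hpltI hpp
    · have hpi : (p : Int) = I := by omega
      have hsI : s.getD I.toNat 0 ≠ I := fun hc => hg (by rw [hgetI, hc])
      rcases ha I.toNat hIL with hc | ⟨q, hq1, hq2, hq3, hq4⟩
      · exact absurd (by rw [hc]; omega) hsI
      · exfalso
        have hpI' : I.toNat = p := by omega
        rw [hpI'] at hq3 hq4
        rcases (Nat.Prime.eq_one_or_self_of_dvd hp q hq3) with h1 | h1
        · rw [h1] at hq2; exact Nat.not_prime_one hq2
        · omega

lemma SInv_base {limit : Int} (hlim : 1 ≤ limit) :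
    SInv limit 2 (PySem.List.pyRange 0 (limit + 1) 1) := by
  have hlen : (PySem.List.pyRange 0 (limit + 1) 1).length = (limit + 1).toNat := by
    rw [PySem.List.length_pyRange_one]; omega
  have hval : ∀ k : ℕ, k < (limit + 1).toNat →
      (PySem.List.pyRange 0 (limit + 1) 1).getD k 0 = (k : Int) := by
    intro k hk
    rw [List.getD_eq_getElem _ _ (by omega), PySem.List.getElem_pyRange_one]
    omega
  refine ⟨hlen, fun k hk => Or.inl (hval k hk), fun k hk p hp hpd hpI hpp => ?_⟩
  have := hp.two_le
  omega

lemma sieve_outer {limit : Int} (hlim : 1 ≤ limit) :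
    ∀ t : ℕ, 2 + (t : Int) ≤ pyIsqrt limit + 1 →
    SInv limit (2 + (t : Int))
      ((PySem.List.pyRange 2 (2 + (t : Int)) 1).foldl (fun spf i =>
        if PySem.List.pyGetD spf i 0 = i then
          (PySem.List.pyRange (i * i) (limit + 1) i).foldl
            (fun spf j => if PySem.List.pyGetD spf j 0 = j then PySem.List.pySetD spf j i else spf) spf
        else spf) (PySem.List.pyRange 0 (limit + 1) 1)) := by
  intro t
  induction t with
  | zero =>
    intro _
    rw [show ((0:ℕ) : Int) = 0 by rfl, add_zero,
      PySem.List.pyRange_one_eq_nil (le_refl 2), List.foldl_nil]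
    exact SInv_base hlim
  | succ t ih =>
    intro hbound
    have hsqle : pyIsqrt limit ≤ limit := by
      unfold pyIsqrt
      have := Nat.sqrt_le_self limit.toNat
      omega
    have hcast : 2 + (((t + 1 : ℕ)) : Int) = (2 + (t : Int)) + 1 := by push_cast; ring
    rw [hcast,
      show PySem.List.pyRange 2 (2 + (t : Int) + 1) 1 = PySem.List.pyRange 2 (2 + (t : Int)) 1 ++ [2 + (t : Int)] from
        PySem.List.pyRange_one_succ_right (by omega),
      List.foldl_append, List.foldl_cons, List.foldl_nil]
    exact SInv_step hlim (by omega) (by omega) (ih (by omega))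

lemma build_spf_fact {limit : Int} (h : 1 ≤ limit) : SpfFact limit (build_spf limit) := by
  have hsq1 : 1 ≤ pyIsqrt limit := by
    unfold pyIsqrt
    have h1 : 1 ≤ Nat.sqrt limit.toNat := by
      rw [show (1 : ℕ) = Nat.sqrt 1 by rfl]
      exact Nat.sqrt_le_sqrt (by omega)
    omega
  have hkey := sieve_outer h (pyIsqrt limit - 1).toNat (by omega)
  rw [show 2 + (((pyIsqrt limit - 1).toNat : ℕ) : Int) = pyIsqrt limit + 1 by omega] at hkey
  obtain ⟨hlen, ha, hb⟩ := hkey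
  have hbody : build_spf limit = (PySem.List.pyRange 2 (pyIsqrt limit + 1) 1).foldl (fun spf i =>
      if PySem.List.pyGetD spf i 0 = i then
        (PySem.List.pyRange (i * i) (limit + 1) i).foldl
          (fun spf j => if PySem.List.pyGetD spf j 0 = j then PySem.List.pySetD spf j i else spf) spf
      else spf) (PySem.List.pyRange 0 (limit + 1) 1) := rfl
  rw [← hbody] at hlen ha hb
  refine ⟨hlen, ?_⟩
  intro k hk2 hkL
  rcases ha k hkL with hc | ⟨p, hp1, hp2, hp3, _⟩
  · have hkprime : k.Prime := by
      by_contra hnp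
      have hq : k.minFac.Prime := Nat.minFac_prime (by omega)
      have hqd : k.minFac ∣ k := Nat.minFac_dvd _
      have hqq : k.minFac * k.minFac ≤ k := by
        have := Nat.minFac_sq_le_self (by omega : 0 < k) hnp
        nlinarith [this]
      have hqI : (k.minFac : Int) < pyIsqrt limit + 1 := by
        unfold pyIsqrt
        have hle : k.minFac ≤ Nat.sqrt limit.toNat := by
          rw [Nat.le_sqrt]
          omega
        omega
      exact hb k hkL k.minFac hq hqd hqI hqq hc
    exact ⟨k, hc, hkprime, dvd_refl k⟩
  · exact ⟨p, hp1, hp2, hp3⟩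

-- ---- the while loop of A ----

lemma spfWhile_spec (p exp : Int) (hp : 2 ≤ p) :
    ∀ (fuel : ℕ) (n mult : Int), 0 < n → n.toNat ≤ fuel →
    ∃ (v : ℕ) (n' : Int),
      spfWhile p exp fuel n mult = (n', mult * (p ^ exp.toNat) ^ v + ∑ j ∈ Finset.range v, (p ^ exp.toNat) ^ j) ∧
      n = n' * p ^ v ∧ 0 < n' ∧ ¬ (p ∣ n') := by
  intro fuel
  induction fuel with
  | zero => intro n mult hn hf; omega
  | succ fuel ih =>
    intro n mult hn hf
    by_cases hdvd : p ∣ n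
    · have hmod : PySem.Int.mod n p = 0 := (PySem.Int.mod_eq_zero_iff_dvd n p).mpr hdvd
      have hfd : PySem.Int.floordiv n p = n / p := PySem.Int.floordiv_eq_ediv_of_pos (by omega)
      obtain ⟨c, hc⟩ := hdvd
      have hc' : n / p = c := by rw [hc]; exact Int.mul_ediv_cancel_left c (by omega)
      have hcpos : 0 < c := by nlinarith
      have hclt : c < n := by nlinarith
      obtain ⟨v, n', heq, hprod, hn', hnd⟩ := ih c (mult * p ^ exp.toNat + 1) hcpos (by omega)
      refine ⟨v + 1, n', ?_, ?_, hn', hnd⟩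
      · have hstep : spfWhile p exp (fuel + 1) n mult
            = spfWhile p exp fuel c (mult * p ^ exp.toNat + 1) := by
          simp [spfWhile, hmod, hfd, hc']
        rw [hstep, heq]
        simp only [Prod.mk.injEq, true_and]
        rw [Finset.sum_range_succ]
        ring
      · rw [hc, hprod]; ring
    · have hmod : ¬ PySem.Int.mod n p = 0 := fun h => hdvd ((PySem.Int.mod_eq_zero_iff_dvd n p).mp h)
      refine ⟨0, n, ?_, by simp, hn, hdvd⟩
      simp [spfWhile, hmod]

-- ---- A's main loop ----

def MInv (limit exp : Int) (I : Int) (r : List Int) : Prop :=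
  r.length = (limit + 1).toNat ∧
  ∀ k : ℕ, k < (limit + 1).toNat → (k : Int) < I → r.getD k 0 = sigI exp.toNat k

lemma MInv_step {limit exp I : Int} {spf r : List Int}
    (hspf : SpfFact limit spf) (hlim : 1 ≤ limit) (hI2 : 2 ≤ I) (hIlim : I ≤ limit)
    (h : MInv limit exp I r) :
    MInv limit exp (I + 1)
      (PySem.List.pySetD r I
        (PySem.List.pyGetD r (spfWhile (PySem.List.pyGetD spf I 0) exp I.toNat I 1).1 0 *
          (spfWhile (PySem.List.pyGetD spf I 0) exp I.toNat I 1).2)) := by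
  obtain ⟨hlen, hval⟩ := h
  obtain ⟨hslen, hsfact⟩ := hspf
  have hIL : I.toNat < (limit + 1).toNat := by omega
  obtain ⟨p, hp1, hp2, hp3⟩ := hsfact I.toNat (by omega) hIL
  have hgetspf : PySem.List.pyGetD spf I 0 = (p : Int) := by
    rw [PySem.List.pyGetD_of_nonneg _ _ (by omega : (0:Int) ≤ I), hp1]
  have hp2' : (2 : Int) ≤ (p : Int) := by exact_mod_cast hp2.two_le
  obtain ⟨v, n', heq, hprod, hn'pos, hnd⟩ :=
    spfWhile_spec (p : Int) exp hp2' I.toNat I 1 (by omega) (le_refl _)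
  rw [hgetspf, heq]
  have hpdI : (p : Int) ∣ I := by
    have hd : (p : Int) ∣ (I.toNat : Int) := by exact_mod_cast hp3
    rwa [Int.toNat_of_nonneg (by omega)] at hd
  have hv1 : 1 ≤ v := by
    by_contra hv
    have hv0 : v = 0 := by omega
    rw [hv0, pow_zero, mul_one] at hprod
    rw [hprod] at hpdI
    exact hnd hpdI
  have hpowge : (2 : Int) ≤ (p : Int) ^ v := by
    calc (2 : Int) = 2 ^ 1 := by ring
    _ ≤ (2 : Int) ^ v := by exact pow_le_pow_right₀ (by omega) hv1
    _ ≤ (p : Int) ^ v := by exact pow_le_pow_left₀ (by omega) hp2' v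
  have hn'lt : n' < I := by nlinarith
  set N := n'.toNat with hN
  have hn'N : n' = (N : Int) := by omega
  have hkeq : I.toNat = p ^ v * N := by
    have hcast : I = ((p ^ v * N : ℕ) : Int) := by rw [hprod, hn'N]; push_cast; ring
    omega
  have hndN : ¬ p ∣ N := by
    intro hc
    apply hnd
    rw [hn'N]; exact_mod_cast hc
  have hcop : Nat.Coprime (p ^ v) N := Nat.Coprime.pow_left v (hp2.coprime_iff_not_dvd.mpr hndN)
  have hread : PySem.List.pyGetD r n' 0 = sigI exp.toNat N := by
    rw [PySem.List.pyGetD_of_nonneg _ _ (by omega : (0:Int) ≤ n'), ← hN]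
    exact hval N (by omega) (by omega)
  have hmult : 1 * ((p : Int) ^ exp.toNat) ^ v + ∑ j ∈ Finset.range v, ((p : Int) ^ exp.toNat) ^ j
      = sigI exp.toNat (p ^ v) := by
    rw [sigI, sigN_prime_pow exp.toNat hp2 v, Finset.sum_range_succ]
    push_cast
    ring
  have hwrite : sigI exp.toNat N * (1 * ((p : Int) ^ exp.toNat) ^ v + ∑ j ∈ Finset.range v, ((p : Int) ^ exp.toNat) ^ j)
      = sigI exp.toNat I.toNat := by
    rw [hmult, hkeq]
    simp only [sigI]
    rw [sigN_mul_coprime exp.toNat hcop]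
    push_cast
    ring
  have hsetd : ∀ w : Int, PySem.List.pySetD r I w = r.set I.toNat w :=
    fun w => PySem.List.pySetD_of_nonneg _ _ (by omega)
  constructor
  · rw [hsetd]; simp [hlen]
  · intro k hk hkI
    by_cases hkeqI : k = I.toNat
    · subst hkeqI
      rw [hsetd, getD_set_self _ _ _ (by omega), hread, hwrite]
    · rw [hsetd, getD_set_ne _ _ _ _ (fun hc => hkeqI hc.symm)]
      exact hval k hk (by omega)

lemma MInv_base {limit exp : Int} (hlim : 1 ≤ limit) :
    MInv limit exp 2 (PySem.List.pySetD (List.replicate (limit + 1).toNat (0 : Int)) 1 1) := by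
  have hL2 : 2 ≤ (limit + 1).toNat := by omega
  have hsetd : PySem.List.pySetD (List.replicate (limit + 1).toNat (0 : Int)) 1 1
      = (List.replicate (limit + 1).toNat (0 : Int)).set 1 1 := by
    rw [PySem.List.pySetD_of_nonneg _ _ (by omega : (0:Int) ≤ 1)]
    rfl
  constructor
  · rw [hsetd]; simp
  · intro k hk hkI
    have : k = 0 ∨ k = 1 := by omega
    rcases this with hk0 | hk1
    · subst hk0
      rw [hsetd, getD_set_ne _ _ _ _ (by omega), sigI_zero]
      simp [List.getD_eq_getElem?_getD, List.getElem?_replicate]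
      split <;> rfl
    · subst hk1
      rw [hsetd, getD_set_self _ _ _ (by simp; omega), sigI_one]

lemma portA_outer {limit exp : Int} (hlim : 1 ≤ limit) :
    ∀ t : ℕ, 2 + (t : Int) ≤ limit + 1 →
    MInv limit exp (2 + (t : Int))
      ((PySem.List.pyRange 2 (2 + (t : Int)) 1).foldl (fun result i =>
        let p := PySem.List.pyGetD (build_spf limit) i 0
        let nm := spfWhile p exp i.toNat i 1
        PySem.List.pySetD result i (PySem.List.pyGetD result nm.1 0 * nm.2))
        (PySem.List.pySetD (List.replicate (limit + 1).toNat (0 : Int)) 1 1)) := by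
  intro t
  induction t with
  | zero =>
    intro _
    rw [show ((0:ℕ) : Int) = 0 by rfl, add_zero,
      PySem.List.pyRange_one_eq_nil (le_refl 2), List.foldl_nil]
    exact MInv_base hlim
  | succ t ih =>
    intro hbound
    have hcast : 2 + (((t + 1 : ℕ)) : Int) = (2 + (t : Int)) + 1 := by push_cast; ring
    rw [hcast,
      show PySem.List.pyRange 2 (2 + (t : Int) + 1) 1 = PySem.List.pyRange 2 (2 + (t : Int)) 1 ++ [2 + (t : Int)] from
        PySem.List.pyRange_one_succ_right (by omega),
      List.foldl_append, List.foldl_cons, List.foldl_nil]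
    exact MInv_step (build_spf_fact hlim) hlim (by omega) (by omega) (ih (by omega))

lemma portA_eq_spec {limit exp : Int} (h : 1 ≤ limit) :
    sum_divisor_powers limit exp = specList limit exp := by
  have hkey := portA_outer (exp := exp) h (limit - 1).toNat (by omega)
  rw [show 2 + (((limit - 1).toNat : ℕ) : Int) = limit + 1 by omega] at hkey
  obtain ⟨hlen, hval⟩ := hkey
  have hbody : sum_divisor_powers limit exp
      = (PySem.List.pyRange 2 (limit + 1) 1).foldl (fun result i =>
          let p := PySem.List.pyGetD (build_spf limit) i 0
          let nm := spfWhile p exp i.toNat i 1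
          PySem.List.pySetD result i (PySem.List.pyGetD result nm.1 0 * nm.2))
        (PySem.List.pySetD (List.replicate (limit + 1).toNat (0 : Int)) 1 1) := rfl
  rw [hbody] at *
  apply List.ext_getElem
  · rw [hlen]; simp [specList]
  · intro k h1 h2
    have hkL : k < (limit + 1).toNat := by rw [← hlen]; exact h1
    have hspec : (specList limit exp)[k] = sigI exp.toNat k := by
      simp [specList]
    rw [hspec, ← List.getD_eq_getElem _ 0 h1]
    exact hval k hkL (by omega)

-- ---- B's loops ----

lemma count_pyRange_mul (D b : Int) (hD : 0 < D) (x : Int) :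
    ((PySem.List.pyRange D b D).count x : Int)
      = if x ∈ PySem.List.pyRange D b D then 1 else 0 := by
  have hnd : (PySem.List.pyRange D b D).Nodup := by
    rw [PySem.List.pyRange_of_pos _ _ hD]
    apply List.Nodup.map _ (List.nodup_range)
    intro a b hab
    have h1 : D * (a : Int) = D * (b : Int) := by linarith
    have h2 : (a : Int) = (b : Int) := mul_left_cancel₀ (by omega) h1
    exact_mod_cast h2
  split
  · rename_i hmem
    rw [List.count_eq_one_of_mem hnd hmem]
    rfl
  · rename_i hmem
    rw [List.count_eq_zero_of_not_mem hmem]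
    rfl

def BInv (limit exp : Int) (D : Int) (r : List Int) : Prop :=
  r.length = (limit + 1).toNat ∧
  ∀ k : ℕ, k < (limit + 1).toNat →
    r.getD k 0 = (if 1 ≤ k then 1 else 0)
      + ∑ d ∈ Finset.Ico 2 D.toNat, (if d ∣ k ∧ 1 ≤ k then ((d : ℤ)) ^ exp.toNat else 0)

lemma BInv_step {limit exp D : Int} {r : List Int}
    (hlim : 1 ≤ limit) (hD2 : 2 ≤ D) (h : BInv limit exp D r) :
    BInv limit exp (D + 1)
      ((PySem.List.pyRange D (limit + 1) D).foldl
        (fun r m => PySem.List.pySetD r m (PySem.List.pyGetD r m 0 + D ^ exp.toNat)) r) := by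
  obtain ⟨hlen, hval⟩ := h
  have hL1 : ((limit + 1).toNat : Int) = limit + 1 := by omega
  have hmem : ∀ x : Int, x ∈ PySem.List.pyRange D (limit + 1) D ↔
      D ≤ x ∧ x < limit + 1 ∧ D ∣ x := by
    intro x
    rw [PySem.List.mem_pyRange_iff_of_pos (by omega)]
    constructor
    · rintro ⟨h1, h2, h3⟩
      refine ⟨h1, h2, ?_⟩
      have hx : x = (x - D) + D := by ring
      rw [hx]; exact dvd_add h3 (dvd_refl D)
    · rintro ⟨h1, h2, h3⟩
      exact ⟨h1, h2, dvd_sub h3 (dvd_refl D)⟩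
  obtain ⟨flen, fval⟩ := foldl_add_at (D ^ exp.toNat) (PySem.List.pyRange D (limit + 1) D) r (by
    intro m hm
    rw [hmem m] at hm
    refine ⟨by omega, ?_⟩
    rw [hlen, hL1]; exact hm.2.1)
  refine ⟨by rw [flen, hlen], ?_⟩
  intro k hk
  rw [fval k, hval k hk, count_pyRange_mul D (limit + 1) (by omega) (k : Int)]
  have hcond : ((k : Int) ∈ PySem.List.pyRange D (limit + 1) D) ↔ (D.toNat ∣ k ∧ 1 ≤ k) := by
    rw [hmem]
    constructor
    · rintro ⟨h1, h2, h3⟩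
      have hdk : (D.toNat : Int) ∣ (k : Int) := by
        rwa [Int.toNat_of_nonneg (by omega : (0:Int) ≤ D)]
      exact ⟨by exact_mod_cast hdk, by omega⟩
    · rintro ⟨h1, h2⟩
      have hDk : D.toNat ≤ k := Nat.le_of_dvd (by omega) h1
      have hdk : (D.toNat : Int) ∣ (k : Int) := by exact_mod_cast h1
      rw [Int.toNat_of_nonneg (by omega : (0:Int) ≤ D)] at hdk
      refine ⟨by omega, by omega, hdk⟩
  have hsum : ∑ d ∈ Finset.Ico 2 (D + 1).toNat, (if d ∣ k ∧ 1 ≤ k then ((d : ℤ)) ^ exp.toNat else 0)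
      = (∑ d ∈ Finset.Ico 2 D.toNat, (if d ∣ k ∧ 1 ≤ k then ((d : ℤ)) ^ exp.toNat else 0))
        + (if D.toNat ∣ k ∧ 1 ≤ k then ((D.toNat : ℤ)) ^ exp.toNat else 0) := by
    rw [show (D + 1).toNat = D.toNat + 1 by omega]
    exact Finset.sum_Ico_succ_top (by omega) _
  rw [hsum]
  have hDcast : ((D.toNat : ℤ)) = D := by omega
  by_cases hc : D.toNat ∣ k ∧ 1 ≤ k
  · rw [if_pos hc, if_pos (hcond.mpr hc), hDcast]
    ring
  · rw [if_neg hc, if_neg (fun hm => hc (hcond.mp hm))]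
    ring

lemma BInv_base {limit exp : Int} (hlim : 1 ≤ limit) :
    BInv limit exp 2
      ((PySem.List.pyRange 2 (limit + 1) 1).foldl (fun r i => PySem.List.pySetD r i 1)
        (PySem.List.pySetD (List.replicate (limit + 1).toNat (0 : Int)) 1 1)) := by
  have hL2 : 2 ≤ (limit + 1).toNat := by omega
  have hsetd : PySem.List.pySetD (List.replicate (limit + 1).toNat (0 : Int)) 1 1
      = (List.replicate (limit + 1).toNat (0 : Int)).set 1 1 := by
    rw [PySem.List.pySetD_of_nonneg _ _ (by omega : (0:Int) ≤ 1)]; rfl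
  have hlen0 : ((List.replicate (limit + 1).toNat (0 : Int)).set 1 1).length = (limit + 1).toNat := by
    simp
  obtain ⟨flen, fval⟩ := foldl_set_one (PySem.List.pyRange 2 (limit + 1) 1)
    ((List.replicate (limit + 1).toNat (0 : Int)).set 1 1) (by
      intro m hm
      rw [PySem.List.mem_pyRange_one] at hm
      rw [hlen0]
      omega)
  rw [hsetd]
  refine ⟨by rw [flen, hlen0], ?_⟩
  intro k hk
  rw [fval k]
  rw [show Finset.Ico 2 (2:Int).toNat = ∅ by rfl, Finset.sum_empty, add_zero]
  by_cases hmem : (k : Int) ∈ PySem.List.pyRange 2 (limit + 1) 1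
  · rw [if_pos hmem]
    rw [PySem.List.mem_pyRange_one] at hmem
    rw [if_pos (by omega)]
  · rw [if_neg hmem]
    rw [PySem.List.mem_pyRange_one] at hmem
    have : k = 0 ∨ k = 1 := by omega
    rcases this with hk0 | hk1
    · subst hk0
      rw [getD_set_ne _ _ _ _ (by omega), if_neg (by omega)]
      simp [List.getD_eq_getElem?_getD, List.getElem?_replicate]
      split <;> rfl
    · subst hk1
      rw [getD_set_self _ _ _ (by simp; omega), if_pos (by omega)]

lemma portB_outer {limit exp : Int} (hlim : 1 ≤ limit) :
    ∀ t : ℕ, 2 + (t : Int) ≤ limit + 1 →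
    BInv limit exp (2 + (t : Int))
      ((PySem.List.pyRange 2 (2 + (t : Int)) 1).foldl (fun r d =>
        let de := d ^ exp.toNat
        (PySem.List.pyRange d (limit + 1) d).foldl
          (fun r m => PySem.List.pySetD r m (PySem.List.pyGetD r m 0 + de)) r)
        ((PySem.List.pyRange 2 (limit + 1) 1).foldl (fun r i => PySem.List.pySetD r i 1)
          (PySem.List.pySetD (List.replicate (limit + 1).toNat (0 : Int)) 1 1))) := by
  intro t
  induction t with
  | zero =>
    intro _
    rw [show ((0:ℕ) : Int) = 0 by rfl, add_zero,
      PySem.List.pyRange_one_eq_nil (le_refl 2), List.foldl_nil]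
    exact BInv_base hlim
  | succ t ih =>
    intro hbound
    have hcast : 2 + (((t + 1 : ℕ)) : Int) = (2 + (t : Int)) + 1 := by push_cast; ring
    rw [hcast,
      show PySem.List.pyRange 2 (2 + (t : Int) + 1) 1 = PySem.List.pyRange 2 (2 + (t : Int)) 1 ++ [2 + (t : Int)] from
        PySem.List.pyRange_one_succ_right (by omega),
      List.foldl_append, List.foldl_cons, List.foldl_nil]
    exact BInv_step hlim (by omega) (ih (by omega))

lemma portB_eq_spec {limit exp : Int} (h : 1 ≤ limit) :
    sum_divisor_powers_alt limit exp = specList limit exp := by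
  have hkey := portB_outer (exp := exp) h (limit - 1).toNat (by omega)
  rw [show 2 + (((limit - 1).toNat : ℕ) : Int) = limit + 1 by omega] at hkey
  obtain ⟨hlen, hval⟩ := hkey
  have hbody : sum_divisor_powers_alt limit exp
      = (PySem.List.pyRange 2 (limit + 1) 1).foldl (fun r d =>
          let de := d ^ exp.toNat
          (PySem.List.pyRange d (limit + 1) d).foldl
            (fun r m => PySem.List.pySetD r m (PySem.List.pyGetD r m 0 + de)) r)
        ((PySem.List.pyRange 2 (limit + 1) 1).foldl (fun r i => PySem.List.pySetD r i 1)
          (PySem.List.pySetD (List.replicate (limit + 1).toNat (0 : Int)) 1 1)) := rfl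
  rw [hbody] at *
  apply List.ext_getElem
  · rw [hlen]; simp [specList]
  · intro k h1 h2
    have hkL : k < (limit + 1).toNat := by rw [← hlen]; exact h1
    have hspec : (specList limit exp)[k] = sigI exp.toNat k := by
      simp [specList]
    rw [hspec, ← List.getD_eq_getElem _ 0 h1, hval k hkL]
    by_cases hk1 : 1 ≤ k
    · rw [if_pos hk1, sigI_split exp.toNat hk1 hkL]
      congr 1
      apply Finset.sum_congr rfl
      intro d _
      simp [hk1]
    · have hk0 : k = 0 := by omega
      subst hk0
      rw [if_neg (by omega), sigI_zero]
      simp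

-- ===== VERDICT (by name: the statement is the Claim_ definition above) =====
theorem sum_divisor_powers_spec : Claim_equal_sum_divisor_powers := by
  intro limit exp _ hpre
  unfold Spec_sum_divisor_powers
  rw [portA_eq_spec hpre.1, portB_eq_spec hpre.1]
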